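-- pv_equiv track=rewrite | github.com/AlgorithmStudy-Allumbus/codingtest_algorithm_study | YoonYn9915/implementation/2025-01-11-[프로그래머스]-자물쇠와 열쇠.py | checkSol
-- ===== SOURCE A (Python) =====
-- def checkSol(keyArr, lockArr, x, y):
--     keySize = len(keyArr)
--     lockSize = len(lockArr)
--
--     boardSize = lockSize * 3
--     board = [[0] * (boardSize) for _ in range(boardSize)]
--
--     start = lockSize - 1
--     end = start + lockSize
--
--     # boardArr 에 lock 삽입
--     for i in range(lockSize):
--         for j in range(lockSize):
--             board[start + i][start + j] += lockArr[i][j]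
--
--     # boardArr 에 key 삽입
--     for i in range(keySize):
--         for j in range(keySize):
--             board[i + x][j + y] += keyArr[i][j]  # 값 복사
--
--     # 전부 1인지 체크
--     for i in range(start, end):
--         for j in range(start, end):
--             if board[i][j] != 1:
--                 return False
--     return True
-- ===== SOURCE B (Python) =====
-- def checkSol(keyArr, lockArr, x, y):
--     keySize = len(keyArr)
--     lockSize = len(lockArr)
--     # no board, no staged passes: derive each overlapping key index arithmetically
--     offI = (lockSize - 1) - x
--     offJ = (lockSize - 1) - y
--     ok = True
--     for i in range(lockSize):
--         for j in range(lockSize):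
--             v = lockArr[i][j]
--             ki = i + offI
--             kj = j + offJ
--             if 0 <= ki < keySize and 0 <= kj < keySize:
--                 v += keyArr[ki][kj]
--             if v != 1:
--                 ok = False
--     return ok
-- ===== Notes on version B (the rewrite author's own statement) =====
-- stated objective: simpler
-- what changed: Eliminates the 3x-padded board and A's three staged passes: a single pass over the lock region computes each cell's value on the fly, deriving the overlapping key index arithmetically with an explicit bounds check.
-- outside the precondition, e.g. on checkSol([[1]], [[0]], -3, -3): A returns True, B returns False
import Mathlib
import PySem

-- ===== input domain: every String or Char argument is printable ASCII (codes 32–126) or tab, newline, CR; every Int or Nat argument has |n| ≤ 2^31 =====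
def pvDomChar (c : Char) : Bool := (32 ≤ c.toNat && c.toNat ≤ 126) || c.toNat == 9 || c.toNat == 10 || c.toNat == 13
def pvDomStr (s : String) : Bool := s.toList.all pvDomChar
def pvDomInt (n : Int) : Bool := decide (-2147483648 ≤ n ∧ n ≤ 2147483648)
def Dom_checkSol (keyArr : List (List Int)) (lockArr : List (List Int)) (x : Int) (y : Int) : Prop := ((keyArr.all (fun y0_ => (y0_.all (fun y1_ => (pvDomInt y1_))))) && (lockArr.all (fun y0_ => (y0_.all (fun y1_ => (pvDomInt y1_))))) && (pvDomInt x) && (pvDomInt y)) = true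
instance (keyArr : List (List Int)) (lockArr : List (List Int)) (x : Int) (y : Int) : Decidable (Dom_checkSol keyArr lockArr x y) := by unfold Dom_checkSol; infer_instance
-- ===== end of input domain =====

-- B drops A's 3×-padded board and its three staged passes for ONE pass over the
-- lock region that computes each cell on the fly, deriving the overlapping key
-- index arithmetically with an explicit bounds check (simpler).

-- ===== PORT A =====
-- m[i][j] with Python indexing (negative wraps, out of range = IndexError = none)
def pyGet2? (m : List (List Int)) (i j : Int) : Option Int :=
  (PySem.List.pyGet? m i).bind fun row => PySem.List.pyGet? row j

-- board[i][j] += d, Python indexing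
def pyAdd2? (b : List (List Int)) (i j d : Int) : Option (List (List Int)) :=
  (PySem.List.pyGet? b i).bind fun row =>
  (PySem.List.pyGet? row j).bind fun v =>
  (PySem.List.pySet? row j (v + d)).bind fun row' =>
  PySem.List.pySet? b i row'

-- inner loop of a write pass: for j in js: board[p+i][q+j] += m[i][j]
def addRow (m : List (List Int)) (p q i : Int) (js : List Int) (b : List (List Int)) :
    Option (List (List Int)) :=
  match js with
  | [] => some b
  | j :: rest =>
      (pyGet2? m i j).bind fun v =>
      (pyAdd2? b (p + i) (q + j) v).bind fun b' =>
      addRow m p q i rest b'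

-- a write pass: for i in is: for j in js: board[p+i][q+j] += m[i][j]
def addAll (m : List (List Int)) (p q : Int) (is js : List Int) (b : List (List Int)) :
    Option (List (List Int)) :=
  match is with
  | [] => some b
  | i :: rest =>
      (addRow m p q i js b).bind fun b' => addAll m p q rest js b'

-- inner loop of the final pass: for j in js: if board[i][j] != 1: return False
def checkRow (b : List (List Int)) (i : Int) (js : List Int) : Option Bool :=
  match js with
  | [] => some true
  | j :: rest =>
      (pyGet2? b i j).bind fun v =>
      if v ≠ 1 then some false else checkRow b i rest

-- final pass: for i in is: for j in js: if board[i][j] != 1: return False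
def checkAll (b : List (List Int)) (is js : List Int) : Option Bool :=
  match is with
  | [] => some true
  | i :: rest =>
      (checkRow b i js).bind fun r =>
      if r then checkAll b rest js else some false

def checkSol (keyArr : List (List Int)) (lockArr : List (List Int)) (x : Int) (y : Int) : Bool :=
  let keySize := keyArr.length
  let lockSize := lockArr.length
  let boardSize := lockSize * 3
  let board := List.replicate boardSize (List.replicate boardSize (0 : Int))
  let start : Int := (lockSize : Int) - 1
  let «end» : Int := start + lockSize
  (((addAll lockArr start start (PySem.List.pyRange 0 lockSize 1) (PySem.List.pyRange 0 lockSize 1) board).bind fun b1 =>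
    (addAll keyArr x y (PySem.List.pyRange 0 keySize 1) (PySem.List.pyRange 0 keySize 1) b1).bind fun b2 =>
    checkAll b2 (PySem.List.pyRange start «end» 1) (PySem.List.pyRange start «end» 1))).getD false

-- ===== PORT B =====
-- v += keyArr[ki][kj] if 0 <= ki < keySize and 0 <= kj < keySize (the bounds guard)
def bKey? (keyArr : List (List Int)) (ki kj v0 : Int) : Option Int :=
  if 0 ≤ ki ∧ ki < (keyArr.length : Int) ∧ 0 ≤ kj ∧ kj < (keyArr.length : Int) then
    (pyGet2? keyArr ki kj).map (fun w => v0 + w)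
  else some v0

-- inner loop: for j in js: v = lockArr[i][j] (+ key cell); if v != 1: ok = False
def altRow (keyArr lockArr : List (List Int)) (offI offJ i : Int) (js : List Int)
    (ok : Bool) : Option Bool :=
  match js with
  | [] => some ok
  | j :: rest =>
      (pyGet2? lockArr i j).bind fun v0 =>
      (bKey? keyArr (i + offI) (j + offJ) v0).bind fun v =>
      altRow keyArr lockArr offI offJ i rest (if v ≠ 1 then false else ok)

-- the single combined pass over the lock region, threading the ok flag
def altAll (keyArr lockArr : List (List Int)) (offI offJ : Int) (is js : List Int)
    (ok : Bool) : Option Bool :=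
  match is with
  | [] => some ok
  | i :: rest =>
      (altRow keyArr lockArr offI offJ i js ok).bind fun ok' =>
      altAll keyArr lockArr offI offJ rest js ok'

def checkSol_alt (keyArr : List (List Int)) (lockArr : List (List Int)) (x : Int) (y : Int) : Bool :=
  let lockSize := lockArr.length
  let offI : Int := (lockSize : Int) - 1 - x
  let offJ : Int := (lockSize : Int) - 1 - y
  (altAll keyArr lockArr offI offJ (PySem.List.pyRange 0 lockSize 1)
    (PySem.List.pyRange 0 lockSize 1) true).getD false

-- ===== PRECONDITION & SPEC =====
-- Pre_ excludes inputs on which A raises an IndexError (a matrix row shorter than the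
-- matrix, or the key written outside the 3×-padded board) and, additionally, the band
-- of negative offsets where Python's negative indices wrap key writes around into the
-- checked window of the padded board, an artefact of the 3×-padding implementation on
-- which A still returns a value (wrapped writes that land outside the window are kept).
def Pre_checkSol (keyArr : List (List Int)) (lockArr : List (List Int)) (x : Int) (y : Int) : Prop :=
  (∀ row ∈ lockArr, lockArr.length ≤ row.length) ∧
  (∀ row ∈ keyArr, keyArr.length ≤ row.length) ∧
  (keyArr.length = 0 ∨
    (1 ≤ lockArr.length ∧
     -(3 * (lockArr.length : Int)) ≤ x ∧ x + keyArr.length ≤ 3 * lockArr.length ∧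
     -(3 * (lockArr.length : Int)) ≤ y ∧ y + keyArr.length ≤ 3 * lockArr.length ∧
     (-((lockArr.length : Int) + 1) ≤ x ∨ x + keyArr.length ≤ -(2 * (lockArr.length : Int) + 1)) ∧
     (-((lockArr.length : Int) + 1) ≤ y ∨ y + keyArr.length ≤ -(2 * (lockArr.length : Int) + 1))))
instance (keyArr : List (List Int)) (lockArr : List (List Int)) (x : Int) (y : Int) : Decidable (Pre_checkSol keyArr lockArr x y) := by unfold Pre_checkSol; infer_instance

def pvWitness_checkSol : List (List Int) × List (List Int) × Int × Int := ([[1, 0], [0, 1]], [[0, 1, 1], [1, 1, 1], [1, 1, 0]], 2, 2)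

def Spec_checkSol (keyArr : List (List Int)) (lockArr : List (List Int)) (x : Int) (y : Int) (out : Bool) : Prop := out = checkSol_alt keyArr lockArr x y
instance (keyArr : List (List Int)) (lockArr : List (List Int)) (x : Int) (y : Int) (out : Bool) : Decidable (Spec_checkSol keyArr lockArr x y out) := by unfold Spec_checkSol; infer_instance

-- ===== CLAIM (what is proved, stated in full; the proofs are below) =====
def Claim_equal_checkSol : Prop := ∀ (keyArr : List (List Int)) (lockArr : List (List Int)) (x : Int) (y : Int), Dom_checkSol keyArr lockArr x y → Pre_checkSol keyArr lockArr x y → Spec_checkSol keyArr lockArr x y (checkSol keyArr lockArr x y)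

-- ===== LEMMAS AND PROOFS =====

-- value of cell (i, j) of a matrix, for proofs (0 when out of range, nonneg indices)
def val (b : List (List Int)) (i j : Int) : Int :=
  (b.getD i.toNat []).getD j.toNat 0

-- the board invariant: a W × W matrix
def BoardInv (W : Nat) (b : List (List Int)) : Prop :=
  b.length = W ∧ ∀ row ∈ b, row.length = W

theorem getD_set_self (l : List Int) (n : Nat) (a d : Int) (h : n < l.length) :
    (l.set n a).getD n d = a := by
  simp [List.getD_eq_getElem?_getD, h]

theorem getD_set_ne (l : List Int) (n m : Nat) (a d : Int) (h : n ≠ m) :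
    (l.set n a).getD m d = l.getD m d := by
  simp [List.getD_eq_getElem?_getD, List.getElem?_set_ne h]

theorem getD_set_self' (l : List (List Int)) (n : Nat) (a : List Int) (h : n < l.length) :
    (l.set n a).getD n [] = a := by
  simp [List.getD_eq_getElem?_getD, h]

theorem getD_set_ne' (l : List (List Int)) (n m : Nat) (a : List Int) (h : n ≠ m) :
    (l.set n a).getD m [] = l.getD m [] := by
  simp [List.getD_eq_getElem?_getD, List.getElem?_set_ne h]

theorem pySet?_eq_some_of_nonneg {α : Type} (xs : List α) (i : Int) (v : α)
    (h0 : 0 ≤ i) (h : i.toNat < xs.length) :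
    PySem.List.pySet? xs i v = some (xs.set i.toNat v) := by
  rw [show i = ((i.toNat : Nat) : Int) by omega]
  simp only [Int.toNat_natCast]
  exact PySem.List.pySet?_natCast _ _ _ h

theorem pyGet2?_eq_val (m : List (List Int)) (i j : Int)
    (hi0 : 0 ≤ i) (hi : i.toNat < m.length)
    (hj0 : 0 ≤ j) (hj : j.toNat < (m.getD i.toNat []).length) :
    pyGet2? m i j = some (val m i j) := by
  have hrow : m.getD i.toNat [] = m[i.toNat] := List.getD_eq_getElem _ _ hi
  have hj' : j.toNat < m[i.toNat].length := by rw [hrow] at hj; exact hj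
  rw [pyGet2?, PySem.List.pyGet?_eq_some_getElem m hi0 (by omega), Option.bind_some,
    PySem.List.pyGet?_eq_some_getElem _ hj0 (by omega), val]
  congr 1
  rw [hrow, List.getD_eq_getElem _ _ hj']

-- Python's effective index: negative t wraps to W + t (for -W ≤ t < W)
def normIdx (W : Nat) (t : Int) : Int := if t < 0 then (W : Int) + t else t

theorem normIdx_nonneg (W : Nat) (t : Int) (h0 : -(W : Int) ≤ t) : 0 ≤ normIdx W t := by
  simp only [normIdx]; split <;> omega

theorem normIdx_lt (W : Nat) (t : Int) (h : t < (W : Int)) : normIdx W t < (W : Int) := by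
  simp only [normIdx]; split <;> omega

theorem pyGet?_wrap {α : Type} (xs : List α) (i : Int)
    (h0 : -(xs.length : Int) ≤ i) (h : i < (xs.length : Int)) :
    PySem.List.pyGet? xs i = xs[(normIdx xs.length i).toNat]? := by
  rcases lt_or_ge i 0 with hneg | hpos
  · simp only [PySem.List.pyGet?, PySem.List.pyIdx?]
    rw [if_neg (by omega), if_pos h0, Option.bind_some]
    congr 1
    simp only [normIdx, if_pos hneg]
    omega
  · rw [PySem.List.pyGet?_of_nonneg xs hpos]
    simp only [normIdx, if_neg (by omega : ¬ i < 0)]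

theorem pySet?_wrap {α : Type} (xs : List α) (i : Int) (v : α)
    (h0 : -(xs.length : Int) ≤ i) (h : i < (xs.length : Int)) :
    PySem.List.pySet? xs i v = some (xs.set (normIdx xs.length i).toNat v) := by
  rcases lt_or_ge i 0 with hneg | hpos
  · simp only [PySem.List.pySet?, PySem.List.pyIdx?]
    rw [if_neg (by omega), if_pos h0, Option.map_some]
    congr 2
    simp only [normIdx, if_pos hneg]
    omega
  · rw [pySet?_eq_some_of_nonneg _ _ _ hpos (by omega)]
    simp only [normIdx, if_neg (by omega : ¬ i < 0)]

theorem pyAdd2?_eq (W : Nat) (b : List (List Int)) (i j d : Int)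
    (hInv : BoardInv W b) (hi0 : -(W : Int) ≤ i) (hi : i < (W : Int))
    (hj0 : -(W : Int) ≤ j) (hj : j < (W : Int)) :
    ∃ b', pyAdd2? b i j d = some b' ∧ BoardInv W b' ∧
      ∀ r c : Int, 0 ≤ r → 0 ≤ c →
        val b' r c = if r = normIdx W i ∧ c = normIdx W j then
          val b (normIdx W i) (normIdx W j) + d else val b r c := by
  obtain ⟨hlen, hrows⟩ := hInv
  subst hlen
  have hni0 : 0 ≤ normIdx b.length i := normIdx_nonneg b.length i hi0
  have hniW : normIdx b.length i < (b.length : Int) := normIdx_lt b.length i hi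
  have hnj0 : 0 ≤ normIdx b.length j := normIdx_nonneg b.length j hj0
  have hnjW : normIdx b.length j < (b.length : Int) := normIdx_lt b.length j hj
  have hiN : (normIdx b.length i).toNat < b.length := by omega
  have hrl : b[(normIdx b.length i).toNat].length = b.length := hrows _ (List.getElem_mem _)
  have hjN : (normIdx b.length j).toNat < b[(normIdx b.length i).toNat].length := by omega
  refine ⟨b.set (normIdx b.length i).toNat
      (b[(normIdx b.length i).toNat].set (normIdx b.length j).toNat
        (b[(normIdx b.length i).toNat][(normIdx b.length j).toNat] + d)), ?_, ?_, ?_⟩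
  · have hg2 := pyGet?_wrap (b[(normIdx b.length i).toNat]) j (by rw [hrl]; omega) (by rw [hrl]; omega)
    have hs2 := pySet?_wrap (b[(normIdx b.length i).toNat]) j
      (b[(normIdx b.length i).toNat][(normIdx b.length j).toNat] + d) (by rw [hrl]; omega) (by rw [hrl]; omega)
    rw [hrl] at hg2 hs2
    rw [pyAdd2?, pyGet?_wrap b i (by omega) (by omega), List.getElem?_eq_getElem hiN,
      Option.bind_some, hg2, List.getElem?_eq_getElem hjN, Option.bind_some, hs2,
      Option.bind_some, pySet?_wrap b i _ (by omega) (by omega)]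
  · constructor
    · simp
    · intro row hrow
      rcases List.mem_or_eq_of_mem_set hrow with h | h
      · exact hrows _ h
      · rw [h]; simpa using hrl
  · intro r c hr0 hc0
    by_cases hri : r = normIdx b.length i
    · subst hri
      rw [val, val, getD_set_self' _ _ _ hiN, List.getD_eq_getElem _ _ hiN]
      by_cases hcj : c = normIdx b.length j
      · subst hcj
        rw [getD_set_self _ _ _ _ hjN, List.getD_eq_getElem _ _ hjN]
        simp
      · rw [getD_set_ne _ _ _ _ _ (by omega)]
        simp [val, hcj, List.getD_eq_getElem?_getD, List.getElem?_eq_getElem hiN]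
    · rw [val, val, getD_set_ne' _ _ _ _ (by omega)]
      simp [val, hri, List.getD_eq_getElem?_getD]


theorem addRow_char (W : Nat) (lo hi : Int) (m : List (List Int)) (p q i : Int) (js : List Int)
    (b : List (List Int)) (hInv : BoardInv W b) (hnd : js.Nodup) (hlo : 0 ≤ lo)
    (hi0 : 0 ≤ i) (hiM : i.toNat < m.length)
    (hjs : ∀ j ∈ js, 0 ≤ j ∧ j.toNat < (m.getD i.toNat []).length ∧
            -(W : Int) ≤ q + j ∧ q + j < (W : Int) ∧
            (q + j < 0 → ¬(lo ≤ (W : Int) + (q + j) ∧ (W : Int) + (q + j) < hi)))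
    (hp : -(W : Int) ≤ p + i ∧ p + i < (W : Int) ∧
            (p + i < 0 → ¬(lo ≤ (W : Int) + (p + i) ∧ (W : Int) + (p + i) < hi))) :
    ∃ b', addRow m p q i js b = some b' ∧ BoardInv W b' ∧
      ∀ r c : Int, lo ≤ r → r < hi → lo ≤ c → c < hi →
        val b' r c = val b r c + (if r = p + i ∧ (c - q) ∈ js then val m i (c - q) else 0) := by
  induction js generalizing b with
  | nil => exact ⟨b, rfl, hInv, by intro r c _ _ _ _; simp⟩
  | cons j rest ih =>
    obtain ⟨hj0, hjm, hqj0, hqjW, hqjmiss⟩ := hjs j (by simp)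
    have hget := pyGet2?_eq_val m i j hi0 hiM hj0 hjm
    obtain ⟨b1, hadd, hInv1, hval1⟩ :=
      pyAdd2?_eq W b (p + i) (q + j) (val m i j) ⟨hInv.1, hInv.2⟩ hp.1 hp.2.1 hqj0 hqjW
    obtain ⟨hjrest, hndr⟩ := List.nodup_cons.mp hnd
    obtain ⟨b', hrec, hInv', hval'⟩ :=
      ih b1 hInv1 hndr (fun j' hj' => hjs j' (List.mem_cons_of_mem _ hj'))
    refine ⟨b', ?_, hInv', ?_⟩
    · simp only [addRow]
      rw [hget, Option.bind_some, hadd, Option.bind_some]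
      exact hrec
    · intro r c hr1 hr2 hc1 hc2
      rw [hval' r c hr1 hr2 hc1 hc2, hval1 r c (by omega) (by omega)]
      by_cases hpi : 0 ≤ p + i
      · have hnip : normIdx W (p + i) = p + i := by
          simp only [normIdx, if_neg (by omega : ¬ p + i < 0)]
        by_cases hqjpos : 0 ≤ q + j
        · have hnjq : normIdx W (q + j) = q + j := by
            simp only [normIdx, if_neg (by omega : ¬ q + j < 0)]
          rw [hnip, hnjq]
          by_cases hr1' : r = p + i
          · by_cases hc1' : c = q + j
            · have hcq : c - q = j := by omega
              simp [hr1', hc1', hjrest]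
            · have hcq : c - q ≠ j := by omega
              simp [hr1', hc1', hcq]
          · simp [hr1']
        · have hcnj : c ≠ normIdx W (q + j) := by
            have := hqjmiss (by omega)
            simp only [normIdx, if_pos (by omega : q + j < 0)]
            omega
          rw [if_neg (fun h => hcnj h.2)]
          have hcq : c - q ≠ j := by omega
          by_cases hr1' : r = p + i
          · simp [hr1', hcq]
          · simp [hr1']
      · have hrni : r ≠ normIdx W (p + i) := by
          have := hp.2.2 (by omega)
          simp only [normIdx, if_pos (by omega : p + i < 0)]
          omega
        rw [if_neg (fun h => hrni h.1)]
        have hrp : r ≠ p + i := by omega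
        simp [hrp]

theorem addAll_char (W : Nat) (lo hi : Int) (m : List (List Int)) (p q : Int) (is js : List Int)
    (b : List (List Int)) (hInv : BoardInv W b) (hndi : is.Nodup) (hndj : js.Nodup) (hlo : 0 ≤ lo)
    (his : ∀ i ∈ is, 0 ≤ i ∧ i.toNat < m.length ∧
            -(W : Int) ≤ p + i ∧ p + i < (W : Int) ∧
            (p + i < 0 → ¬(lo ≤ (W : Int) + (p + i) ∧ (W : Int) + (p + i) < hi)))
    (hjs : ∀ i ∈ is, ∀ j ∈ js, 0 ≤ j ∧ j.toNat < (m.getD i.toNat []).length ∧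
            -(W : Int) ≤ q + j ∧ q + j < (W : Int) ∧
            (q + j < 0 → ¬(lo ≤ (W : Int) + (q + j) ∧ (W : Int) + (q + j) < hi))) :
    ∃ b', addAll m p q is js b = some b' ∧ BoardInv W b' ∧
      ∀ r c : Int, lo ≤ r → r < hi → lo ≤ c → c < hi →
        val b' r c = val b r c +
          (if (r - p) ∈ is ∧ (c - q) ∈ js then val m (r - p) (c - q) else 0) := by
  induction is generalizing b with
  | nil => exact ⟨b, rfl, hInv, by intro r c _ _ _ _; simp⟩
  | cons i rest ih =>
    obtain ⟨hi0, him, hpi0, hpiW, hpimiss⟩ := his i (by simp)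
    obtain ⟨b1, hrow, hInv1, hval1⟩ :=
      addRow_char W lo hi m p q i js b hInv hndj hlo hi0 him (hjs i (by simp))
        ⟨hpi0, hpiW, hpimiss⟩
    obtain ⟨hirest, hndr⟩ := List.nodup_cons.mp hndi
    obtain ⟨b', hrec, hInv', hval'⟩ :=
      ih b1 hInv1 hndr (fun i' hi' => his i' (List.mem_cons_of_mem _ hi'))
        (fun i' hi' => hjs i' (List.mem_cons_of_mem _ hi'))
    refine ⟨b', ?_, hInv', ?_⟩
    · simp only [addAll]
      rw [hrow, Option.bind_some]
      exact hrec
    · intro r c hr1 hr2 hc1 hc2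
      rw [hval' r c hr1 hr2 hc1 hc2, hval1 r c hr1 hr2 hc1 hc2]
      by_cases hr1' : r = p + i
      · have hrp : r - p = i := by omega
        simp [hr1', hirest]
      · have hrp : r - p ≠ i := by omega
        simp [hr1', hrp]

theorem checkRow_char (W : Nat) (b : List (List Int)) (i : Int) (js : List Int)
    (hInv : BoardInv W b) (hi0 : 0 ≤ i) (hi : i < (W : Int))
    (hjs : ∀ j ∈ js, 0 ≤ j ∧ j < (W : Int)) :
    checkRow b i js = some (js.all fun j => val b i j == 1) := by
  induction js with
  | nil => rfl
  | cons j rest ih =>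
    obtain ⟨hj0, hjW⟩ := hjs j (by simp)
    obtain ⟨hlen, hrows⟩ := hInv
    have hiN : i.toNat < b.length := by omega
    have hrl : (b.getD i.toNat []).length = W := by
      rw [List.getD_eq_getElem _ _ hiN]; exact hrows _ (List.getElem_mem _)
    have hget := pyGet2?_eq_val b i j hi0 hiN hj0 (by omega)
    simp only [checkRow]
    rw [hget, Option.bind_some, ih (fun j' hj' => hjs j' (List.mem_cons_of_mem _ hj'))]
    by_cases hv : val b i j = 1
    · simp [hv]
    · simp [hv]

theorem checkAll_char (W : Nat) (b : List (List Int)) (is js : List Int)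
    (hInv : BoardInv W b) (his : ∀ i ∈ is, 0 ≤ i ∧ i < (W : Int))
    (hjs : ∀ j ∈ js, 0 ≤ j ∧ j < (W : Int)) :
    checkAll b is js = some (is.all fun i => js.all fun j => val b i j == 1) := by
  induction is with
  | nil => rfl
  | cons i rest ih =>
    obtain ⟨hi0, hiW⟩ := his i (by simp)
    simp only [checkAll]
    rw [checkRow_char W b i js hInv hi0 hiW hjs, Option.bind_some,
      ih (fun i' hi' => his i' (List.mem_cons_of_mem _ hi'))]
    by_cases hrow : (js.all fun j => val b i j == 1) = true
    · simp [hrow]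
    · simp [hrow]

-- the value B computes for lock cell (i, j), for proofs
def bCell (keyArr lockArr : List (List Int)) (offI offJ i j : Int) : Int :=
  val lockArr i j +
    (if 0 ≤ i + offI ∧ i + offI < (keyArr.length : Int) ∧
        0 ≤ j + offJ ∧ j + offJ < (keyArr.length : Int) then
      val keyArr (i + offI) (j + offJ) else 0)

theorem bKey?_eq (keyArr : List (List Int)) (ki kj v0 : Int)
    (hkeyr : ∀ row ∈ keyArr, keyArr.length ≤ row.length) :
    bKey? keyArr ki kj v0 =
      some (v0 + if 0 ≤ ki ∧ ki < (keyArr.length : Int) ∧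
                    0 ≤ kj ∧ kj < (keyArr.length : Int) then val keyArr ki kj else 0) := by
  rw [bKey?]
  by_cases hC : 0 ≤ ki ∧ ki < (keyArr.length : Int) ∧ 0 ≤ kj ∧ kj < (keyArr.length : Int)
  · obtain ⟨h1, h2, h3, h4⟩ := hC
    have hiN : ki.toNat < keyArr.length := by omega
    have hrl : keyArr.length ≤ (keyArr.getD ki.toNat []).length := by
      rw [List.getD_eq_getElem _ _ hiN]
      exact hkeyr _ (List.getElem_mem _)
    rw [if_pos ⟨h1, h2, h3, h4⟩,
      pyGet2?_eq_val keyArr ki kj h1 hiN h3 (by omega), Option.map_some,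
      if_pos ⟨h1, h2, h3, h4⟩]
  · rw [if_neg hC, if_neg hC, add_zero]

theorem altRow_char (keyArr lockArr : List (List Int)) (offI offJ i : Int) (js : List Int)
    (ok : Bool) (hkeyr : ∀ row ∈ keyArr, keyArr.length ≤ row.length)
    (hi0 : 0 ≤ i) (hi : i.toNat < lockArr.length)
    (hjs : ∀ j ∈ js, 0 ≤ j ∧ j.toNat < (lockArr.getD i.toNat []).length) :
    altRow keyArr lockArr offI offJ i js ok =
      some (ok && js.all fun j => bCell keyArr lockArr offI offJ i j == 1) := by
  induction js generalizing ok with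
  | nil => simp [altRow]
  | cons j rest ih =>
    obtain ⟨hj0, hjm⟩ := hjs j (by simp)
    have hget := pyGet2?_eq_val lockArr i j hi0 hi hj0 hjm
    simp only [altRow]
    rw [hget, Option.bind_some, bKey?_eq keyArr _ _ _ hkeyr, Option.bind_some,
      ih _ (fun j' hj' => hjs j' (List.mem_cons_of_mem _ hj')), List.all_cons]
    by_cases hv : bCell keyArr lockArr offI offJ i j = 1
    · rw [if_neg (by rw [bCell] at hv; omega)]
      have hb : (bCell keyArr lockArr offI offJ i j == 1) = true := by simp [hv]
      rw [hb, Bool.true_and]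
    · rw [if_pos (by rw [bCell] at hv; omega)]
      have hb : (bCell keyArr lockArr offI offJ i j == 1) = false := by simp [hv]
      rw [hb]
      simp

theorem altAll_char (keyArr lockArr : List (List Int)) (offI offJ : Int) (is js : List Int)
    (ok : Bool) (hkeyr : ∀ row ∈ keyArr, keyArr.length ≤ row.length)
    (his : ∀ i ∈ is, 0 ≤ i ∧ i.toNat < lockArr.length)
    (hjs : ∀ i ∈ is, ∀ j ∈ js, 0 ≤ j ∧ j.toNat < (lockArr.getD i.toNat []).length) :
    altAll keyArr lockArr offI offJ is js ok =
      some (ok && is.all fun i => js.all fun j => bCell keyArr lockArr offI offJ i j == 1) := by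
  induction is generalizing ok with
  | nil => simp [altAll]
  | cons i rest ih =>
    obtain ⟨hi0, hiW⟩ := his i (by simp)
    simp only [altAll]
    rw [altRow_char keyArr lockArr offI offJ i js ok hkeyr hi0 hiW (hjs i (by simp)),
      Option.bind_some,
      ih _ (fun i' hi' => his i' (List.mem_cons_of_mem _ hi'))
        (fun i' hi' => hjs i' (List.mem_cons_of_mem _ hi')), List.all_cons]
    rw [Bool.and_assoc]

theorem pyRange_nil (a b : Int) (h : b ≤ a) : PySem.List.pyRange a b 1 = [] :=
  List.eq_nil_of_length_eq_zero (by rw [PySem.List.length_pyRange_one]; omega)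

theorem bool_ext (a b : Bool) (h : a = true ↔ b = true) : a = b := by
  cases a <;> cases b <;> simp_all

theorem val_replicate (W : Nat) (r c : Int) :
    val (List.replicate W (List.replicate W (0 : Int))) r c = 0 := by
  rw [val]
  by_cases hr : r.toNat < W
  · rw [show (List.replicate W (List.replicate W (0 : Int))).getD r.toNat [] =
        List.replicate W (0 : Int) by
      rw [List.getD_eq_getElem _ _ (by simpa using hr), List.getElem_replicate]]
    by_cases hc : c.toNat < W
    · rw [List.getD_eq_getElem _ _ (by simpa using hc), List.getElem_replicate]
    · rw [List.getD_eq_default _ _ (by simpa using Nat.le_of_not_lt hc)]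
  · rw [show (List.replicate W (List.replicate W (0 : Int))).getD r.toNat [] = [] from
      List.getD_eq_default _ _ (by simpa using Nat.le_of_not_lt hr)]
    rfl

-- ===== VERDICT (by name: the statement is the Claim_ definition above) =====
theorem checkSol_spec : Claim_equal_checkSol := by
  intro keyArr lockArr x y _ hPre
  obtain ⟨hlockr, hkeyr, hoff⟩ := hPre
  unfold Spec_checkSol
  by_cases hL : lockArr.length = 0
  · have hK0 : keyArr.length = 0 := by
      rcases hoff with h | ⟨h1, _, _, _, _, _, _⟩ <;> omega
    obtain rfl : lockArr = [] := List.length_eq_zero_iff.mp hL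
    obtain rfl : keyArr = [] := List.length_eq_zero_iff.mp hK0
    have e1 : PySem.List.pyRange 0 0 1 = [] := pyRange_nil _ _ (by omega)
    simp [checkSol, checkSol_alt, addAll, checkAll, altAll, e1]
  · have hLpos : 0 < lockArr.length := Nat.pos_of_ne_zero hL
    have hInv0 : BoardInv (lockArr.length * 3)
        (List.replicate (lockArr.length * 3) (List.replicate (lockArr.length * 3) (0 : Int))) := by
      refine ⟨List.length_replicate, fun row hrow => ?_⟩
      rw [List.eq_of_mem_replicate hrow]
      exact List.length_replicate
    -- the lock pass (all its writes are non-negative, so the wrap clauses are vacuous)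
    obtain ⟨b1, hb1, hInv1, hv1⟩ := addAll_char (lockArr.length * 3)
      ((lockArr.length : Int) - 1) (((lockArr.length : Int) - 1) + lockArr.length) lockArr
      ((lockArr.length : Int) - 1) ((lockArr.length : Int) - 1)
      (PySem.List.pyRange 0 lockArr.length 1) (PySem.List.pyRange 0 lockArr.length 1)
      (List.replicate (lockArr.length * 3) (List.replicate (lockArr.length * 3) (0 : Int)))
      hInv0 (PySem.List.nodup_pyRange_one _ _) (PySem.List.nodup_pyRange_one _ _) (by omega)
      (by intro i hi
          rw [PySem.List.mem_pyRange_one] at hi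
          exact ⟨hi.1, by omega, by omega, by omega, by intro h; omega⟩)
      (by intro i hi j hj
          rw [PySem.List.mem_pyRange_one] at hi
          rw [PySem.List.mem_pyRange_one] at hj
          have hiN : i.toNat < lockArr.length := by omega
          have : lockArr.length ≤ (lockArr.getD i.toNat []).length := by
            rw [List.getD_eq_getElem _ _ hiN]
            exact hlockr _ (List.getElem_mem _)
          exact ⟨hj.1, by omega, by omega, by omega, by intro h; omega⟩)
    -- the key pass (a write with a negative index wraps to row/col ≥ 2·lockSize − 1,
    -- outside the checked window, because Pre_ bounds x, y below by −(lockSize+1))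
    obtain ⟨b2, hb2, hInv2, hv2⟩ := addAll_char (lockArr.length * 3)
      ((lockArr.length : Int) - 1) (((lockArr.length : Int) - 1) + lockArr.length) keyArr x y
      (PySem.List.pyRange 0 keyArr.length 1) (PySem.List.pyRange 0 keyArr.length 1) b1
      hInv1 (PySem.List.nodup_pyRange_one _ _) (PySem.List.nodup_pyRange_one _ _) (by omega)
      (by intro i hi
          rw [PySem.List.mem_pyRange_one] at hi
          rcases hoff with h | ⟨hL1, hx0, hxK, hy0, hyK, hxs, hys⟩
          · omega
          · exact ⟨hi.1, by omega, by omega, by omega, by intro h; omega⟩)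
      (by intro i hi j hj
          rw [PySem.List.mem_pyRange_one] at hi
          rw [PySem.List.mem_pyRange_one] at hj
          rcases hoff with h | ⟨hL1, hx0, hxK, hy0, hyK, hxs, hys⟩
          · omega
          · have hiN : i.toNat < keyArr.length := by omega
            have : keyArr.length ≤ (keyArr.getD i.toNat []).length := by
              rw [List.getD_eq_getElem _ _ hiN]
              exact hkeyr _ (List.getElem_mem _)
            exact ⟨hj.1, by omega, by omega, by omega, by intro h; omega⟩)
    -- the check pass
    have hchk := checkAll_char (lockArr.length * 3) b2
      (PySem.List.pyRange ((lockArr.length : Int) - 1)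
        (((lockArr.length : Int) - 1) + lockArr.length) 1)
      (PySem.List.pyRange ((lockArr.length : Int) - 1)
        (((lockArr.length : Int) - 1) + lockArr.length) 1)
      hInv2
      (by intro i hi; rw [PySem.List.mem_pyRange_one] at hi; exact ⟨by omega, by omega⟩)
      (by intro j hj; rw [PySem.List.mem_pyRange_one] at hj; exact ⟨by omega, by omega⟩)
    -- B's single pass
    have halt := altAll_char keyArr lockArr ((lockArr.length : Int) - 1 - x)
      ((lockArr.length : Int) - 1 - y)
      (PySem.List.pyRange 0 lockArr.length 1) (PySem.List.pyRange 0 lockArr.length 1)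
      true hkeyr
      (by intro i hi
          rw [PySem.List.mem_pyRange_one] at hi
          exact ⟨hi.1, by omega⟩)
      (by intro i hi j hj
          rw [PySem.List.mem_pyRange_one] at hi
          rw [PySem.List.mem_pyRange_one] at hj
          have hiN : i.toNat < lockArr.length := by omega
          have : lockArr.length ≤ (lockArr.getD i.toNat []).length := by
            rw [List.getD_eq_getElem _ _ hiN]
            exact hlockr _ (List.getElem_mem _)
          exact ⟨hj.1, by omega⟩)
    -- the per-cell value of A's finished board inside the check window
    have hcell : ∀ i j : Int, (lockArr.length : Int) - 1 ≤ i →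
        i < ((lockArr.length : Int) - 1) + lockArr.length →
        (lockArr.length : Int) - 1 ≤ j → j < ((lockArr.length : Int) - 1) + lockArr.length →
        val b2 i j = val lockArr (i - ((lockArr.length : Int) - 1)) (j - ((lockArr.length : Int) - 1)) +
          (if 0 ≤ i - x ∧ i - x < (keyArr.length : Int) ∧ 0 ≤ j - y ∧ j - y < (keyArr.length : Int)
            then val keyArr (i - x) (j - y) else 0) := by
      intro i j hi1 hi2 hj1 hj2
      rw [hv2 i j (by omega) (by omega) (by omega) (by omega),
        hv1 i j (by omega) (by omega) (by omega) (by omega), val_replicate]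
      simp only [PySem.List.mem_pyRange_one]
      rw [if_pos (by omega :
        ((0 : Int) ≤ i - ((lockArr.length : Int) - 1) ∧ i - ((lockArr.length : Int) - 1) < lockArr.length) ∧
        ((0 : Int) ≤ j - ((lockArr.length : Int) - 1) ∧ j - ((lockArr.length : Int) - 1) < lockArr.length))]
      by_cases hC : 0 ≤ i - x ∧ i - x < (keyArr.length : Int) ∧ 0 ≤ j - y ∧ j - y < (keyArr.length : Int)
      · rw [if_pos (by omega : ((0 : Int) ≤ i - x ∧ i - x < keyArr.length) ∧ ((0 : Int) ≤ j - y ∧ j - y < keyArr.length)), if_pos hC]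
        ring
      · rw [if_neg (by omega :
          ¬(((0 : Int) ≤ i - x ∧ i - x < keyArr.length) ∧ ((0 : Int) ≤ j - y ∧ j - y < keyArr.length))), if_neg hC]
        ring
    -- assemble
    simp only [checkSol, checkSol_alt]
    rw [hb1, Option.bind_some, hb2, Option.bind_some, hchk, Option.getD_some, halt,
      Option.getD_some, Bool.true_and]
    apply bool_ext
    simp only [List.all_eq_true, PySem.List.mem_pyRange_one, beq_iff_eq, bCell]
    constructor
    · intro h i' hi' j' hj'
      have hx := h (((lockArr.length : Int) - 1) + i') ⟨by omega, by omega⟩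
        (((lockArr.length : Int) - 1) + j') ⟨by omega, by omega⟩
      rw [hcell _ _ (by omega) (by omega) (by omega) (by omega)] at hx
      have e1 : ((lockArr.length : Int) - 1) + i' - ((lockArr.length : Int) - 1) = i' := by ring
      have e2 : ((lockArr.length : Int) - 1) + j' - ((lockArr.length : Int) - 1) = j' := by ring
      have e3 : ((lockArr.length : Int) - 1) + i' - x = i' + ((lockArr.length : Int) - 1 - x) := by ring
      have e4 : ((lockArr.length : Int) - 1) + j' - y = j' + ((lockArr.length : Int) - 1 - y) := by ring
      rw [e1, e2, e3, e4] at hx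
      exact hx
    · intro h i hi j hj
      have hx := h (i - ((lockArr.length : Int) - 1)) ⟨by omega, by omega⟩
        (j - ((lockArr.length : Int) - 1)) ⟨by omega, by omega⟩
      rw [hcell _ _ (by omega) (by omega) (by omega) (by omega)]
      have e3 : i - ((lockArr.length : Int) - 1) + ((lockArr.length : Int) - 1 - x) = i - x := by ring
      have e4 : j - ((lockArr.length : Int) - 1) + ((lockArr.length : Int) - 1 - y) = j - y := by ring
      rw [e3, e4] at hx
      exact hx
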